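-- pv_equiv track=rewrite | github.com/lan17/alg_cmp | GCJ/2019/qualification/B.py | path_to_dict
-- ===== SOURCE A (Python) =====
-- def path_to_dict(path):
--     x, y = 0, 0
--     d = dict()
--     for c in path:
--         d[(x, y)] = c
--         if c == 'S':
--             y += 1
--         if c == 'E':
--             x += 1
--     return d
-- ===== SOURCE B (Python) =====
-- def path_to_dict(path):
--     def prefix_counts(ch):
--         total = 0
--         out = []
--         for c in path:
--             out.append(total)
--             if c == ch:
--                 total += 1
--         return out
--
--     xs = prefix_counts('E')
--     ys = prefix_counts('S')
--     return {(x, y): c for (x, y), c in zip(zip(xs, ys), path)}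
-- ===== Notes on version B (the rewrite author's own statement) =====
-- stated objective: alternative
-- what changed: Replaces the single fused loop that mutates the coordinates and the dict together with a prefix-count decomposition: two scan passes compute the east-count and south-count before each step as lists, and a dict comprehension over their zip with the path assembles the result.
import Mathlib
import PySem

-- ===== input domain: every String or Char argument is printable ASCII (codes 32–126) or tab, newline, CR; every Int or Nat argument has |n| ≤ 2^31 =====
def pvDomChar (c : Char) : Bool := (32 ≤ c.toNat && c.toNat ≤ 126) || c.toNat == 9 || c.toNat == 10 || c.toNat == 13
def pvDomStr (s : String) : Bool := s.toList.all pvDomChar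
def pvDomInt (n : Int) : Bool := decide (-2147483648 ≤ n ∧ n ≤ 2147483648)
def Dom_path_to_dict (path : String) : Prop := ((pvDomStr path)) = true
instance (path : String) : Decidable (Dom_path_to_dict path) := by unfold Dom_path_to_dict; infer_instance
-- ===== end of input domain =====

-- B replaces A's fused accumulator loop by prefix-count coordinate lists zipped with the path (alternative decomposition, same cost).


-- ===== PORT A =====
-- one loop over the path, mutating x, y and the dict together
def path_to_dict (path : String) : List (Int × Int × String) :=
  let st := path.toList.foldl
    (fun (st : Int × Int × PySem.Dict (Int × Int) String) c =>
      let x := st.1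
      let y := st.2.1
      let d := (st.2.2).insert (x, y) (String.ofList [c])
      let y' := if c = 'S' then y + 1 else y
      let x' := if c = 'E' then x + 1 else x
      (x', y', d))
    (0, 0, PySem.Dict.empty)
  st.2.2.items.map (fun p => (p.1.1, p.1.2, p.2))

-- ===== PORT B =====
-- prefix_counts ch: the count of ch strictly before each position (B's helper, append loop)
def pvPrefixCounts (cs : List Char) (ch : Char) : List Int :=
  (cs.foldl
    (fun (st : Int × List Int) c =>
      (if c = ch then st.1 + 1 else st.1, st.2 ++ [st.1]))
    (0, [])).2

def path_to_dict_alt (path : String) : List (Int × Int × String) :=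
  let cs := path.toList
  let xs := pvPrefixCounts cs 'E'
  let ys := pvPrefixCounts cs 'S'
  let d := (List.zip (List.zip xs ys) cs).foldl
      (fun (d : PySem.Dict (Int × Int) String) p => d.insert p.1 (String.ofList [p.2]))
      PySem.Dict.empty
  d.items.map (fun p => (p.1.1, p.1.2, p.2))

-- ===== PRECONDITION & SPEC =====
def Spec_path_to_dict (path : String) (out : List (Int × Int × String)) : Prop := out = path_to_dict_alt path
instance (path : String) (out : List (Int × Int × String)) : Decidable (Spec_path_to_dict path out) := by unfold Spec_path_to_dict; infer_instance

-- ===== CLAIM (what is proved, stated in full; the proofs are below) =====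
def Claim_equal_path_to_dict : Prop := ∀ (path : String), Dom_path_to_dict path → Spec_path_to_dict path (path_to_dict path)

-- ===== LEMMAS AND PROOFS =====

-- proof-side structural version of the prefix-count list
def pvPfx (cs : List Char) (ch : Char) : List Int :=
  match cs with
  | [] => []
  | c :: cs => 0 :: (pvPfx cs ch).map (· + if c = ch then 1 else 0)

theorem pvPrefixCounts_aux (ch : Char) :
    ∀ (cs : List Char) (t : Int) (acc : List Int),
      (cs.foldl
        (fun (st : Int × List Int) c =>
          (if c = ch then st.1 + 1 else st.1, st.2 ++ [st.1]))
        (t, acc)).2 = acc ++ (pvPfx cs ch).map (· + t) := by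
  intro cs
  induction cs with
  | nil => intro t acc; simp [pvPfx]
  | cons c cs ih =>
    intro t acc
    simp only [List.foldl_cons, pvPfx, List.map_cons, List.map_map]
    rw [ih]
    simp only [List.append_assoc, List.singleton_append, zero_add]
    congr 2
    apply List.map_congr_left
    intro v _
    simp only [Function.comp_apply]
    split_ifs <;> ring

theorem pvPrefixCounts_eq (cs : List Char) (ch : Char) :
    pvPrefixCounts cs ch = pvPfx cs ch := by
  unfold pvPrefixCounts
  rw [pvPrefixCounts_aux ch cs 0 []]
  simp

-- coordinate/char triples of the path, generated structurally from a start position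
def pvTriples (cs : List Char) (x y : Int) : List ((Int × Int) × Char) :=
  match cs with
  | [] => []
  | c :: cs =>
    ((x, y), c) :: pvTriples cs (if c = 'E' then x + 1 else x) (if c = 'S' then y + 1 else y)

theorem pvZip_eq_triples :
    ∀ (cs : List Char) (x y : Int),
      List.zip (List.zip ((pvPfx cs 'E').map (· + x)) ((pvPfx cs 'S').map (· + y))) cs
        = pvTriples cs x y := by
  intro cs
  induction cs with
  | nil => intro x y; simp [pvPfx, pvTriples]
  | cons c cs ih =>
    intro x y
    simp only [pvPfx, List.map_cons, List.map_map, List.zip_cons_cons, pvTriples, zero_add]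
    rw [show ((pvPfx cs 'E').map ((· + x) ∘ (· + if c = 'E' then 1 else 0)))
          = (pvPfx cs 'E').map (· + (if c = 'E' then x + 1 else x)) by
        apply List.map_congr_left; intro v _; simp only [Function.comp_apply]; split_ifs <;> ring,
      show ((pvPfx cs 'S').map ((· + y) ∘ (· + if c = 'S' then 1 else 0)))
          = (pvPfx cs 'S').map (· + (if c = 'S' then y + 1 else y)) by
        apply List.map_congr_left; intro v _; simp only [Function.comp_apply]; split_ifs <;> ring]
    rw [ih]

theorem pvFoldA_eq_foldIns :
    ∀ (cs : List Char) (x y : Int) (d : PySem.Dict (Int × Int) String),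
      (cs.foldl
        (fun (st : Int × Int × PySem.Dict (Int × Int) String) c =>
          let x := st.1
          let y := st.2.1
          let d := (st.2.2).insert (x, y) (String.ofList [c])
          let y' := if c = 'S' then y + 1 else y
          let x' := if c = 'E' then x + 1 else x
          (x', y', d))
        (x, y, d)).2.2
      = (pvTriples cs x y).foldl
          (fun (d : PySem.Dict (Int × Int) String) p => d.insert p.1 (String.ofList [p.2])) d := by
  intro cs
  induction cs with
  | nil => intro x y d; simp [pvTriples]
  | cons c cs ih =>
    intro x y d
    simp only [List.foldl_cons, pvTriples]
    exact ih _ _ _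

theorem pvId_map_add_zero (l : List Int) : l.map (· + (0 : Int)) = l := by
  simp

-- ===== VERDICT (by name: the statement is the Claim_ definition above) =====
theorem path_to_dict_spec : Claim_equal_path_to_dict := by
  intro path _
  unfold Spec_path_to_dict path_to_dict path_to_dict_alt
  simp only [pvPrefixCounts_eq]
  rw [← pvId_map_add_zero (pvPfx path.toList 'E'), ← pvId_map_add_zero (pvPfx path.toList 'S'),
    pvZip_eq_triples]
  rw [pvFoldA_eq_foldIns]
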